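-- pv_equiv track=rewrite | github.com/Luolingwei/LeetCode | TwoPointers/Q1147_Longest Chunked Palindrome Decomposition.py | longestDecomposition
-- ===== SOURCE A (Python) =====
-- def longestDecomposition(S):
--     res,l,r=0,0,len(S)-1
--     lchar,rchar='',''
--     while l<=r:
--         lchar,rchar=lchar+S[l],S[r]+rchar
--         if lchar==rchar:
--             res+=1 if l==r else 2
--             lchar,rchar='',''
--         l,r=l+1,r-1
--     return res+(lchar!='')
-- ===== SOURCE B (Python) =====
-- def longestDecomposition(S):
--     count = 0
--     while S:
--         n = len(S)
--         for k in range(1, n // 2 + 1):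
--             if S[:k] == S[n - k:]:
--                 count += 2
--                 S = S[k:n - k]
--                 break
--         else:
--             count += 1
--             S = ''
--     return count
-- ===== Notes on version B (the rewrite author's own statement) =====
-- stated objective: alternative
-- what changed: Replaces A's two-pointer while loop that accumulates prefix/suffix character buffers by a greedy loop that repeatedly finds the smallest matching prefix/suffix chunk by direct slice comparison and peels it off both ends.
import Mathlib
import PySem

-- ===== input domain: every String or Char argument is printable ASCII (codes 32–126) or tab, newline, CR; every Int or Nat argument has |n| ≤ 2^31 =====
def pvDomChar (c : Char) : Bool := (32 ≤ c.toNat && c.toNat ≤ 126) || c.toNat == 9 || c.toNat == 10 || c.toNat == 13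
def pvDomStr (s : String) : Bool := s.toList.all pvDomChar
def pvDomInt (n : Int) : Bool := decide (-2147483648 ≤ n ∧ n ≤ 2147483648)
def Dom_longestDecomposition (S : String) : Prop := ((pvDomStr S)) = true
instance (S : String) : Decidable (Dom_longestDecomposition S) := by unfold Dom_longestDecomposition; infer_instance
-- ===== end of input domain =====

-- B replaces A's two-pointer character-accumulating while loop by a recursive
-- "peel the smallest matching prefix/suffix chunk" decomposition (objective: alternative).

-- ===== PORT A =====
-- A's while loop (fuel only makes the recursion structural; with fuel = len(S) it never
-- runs out, since each iteration moves both pointers).  S[l] / S[r] are always in range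
-- when read (0 ≤ l ≤ r < len), so pyGetD's default is never used.
def pvLoopA (cs : List Char) (fuel : Nat) (l r res : Int) (lchar rchar : List Char) : Int :=
  match fuel with
  | 0 => res + (if lchar ≠ [] then 1 else 0)
  | fuel + 1 =>
    if l ≤ r then
      if lchar ++ [PySem.List.pyGetD cs l ' '] = PySem.List.pyGetD cs r ' ' :: rchar then
        pvLoopA cs fuel (l + 1) (r - 1) (res + if l = r then 1 else 2) [] []
      else
        pvLoopA cs fuel (l + 1) (r - 1) res
          (lchar ++ [PySem.List.pyGetD cs l ' ']) (PySem.List.pyGetD cs r ' ' :: rchar)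
    else res + (if lchar ≠ [] then 1 else 0)

def longestDecomposition (S : String) : Int :=
  pvLoopA S.toList S.toList.length 0 ((S.toList.length : Int) - 1) 0 [] []

-- ===== PORT B =====
-- Source B's 'for k in range(1, n//2+1)' search: smallest k with S[:k] == S[n-k:]
-- (fuel = n suffices: the loop runs at most n//2 times)
def pvFindK (cs : List Char) (n : Nat) (fuel k : Nat) : Option Nat :=
  match fuel with
  | 0 => none
  | fuel + 1 =>
    if k ≤ n / 2 then
      if cs.take k = cs.drop (n - k) then some k else pvFindK cs n fuel (k + 1)
    else none

-- Source B's while loop peeling matched chunks off both ends, accumulating the count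
-- (each pass shrinks S or empties it, so fuel = n + 1 never runs out)
def pvAltLoop (fuel : Nat) (count : Int) (cs : List Char) : Int :=
  match fuel with
  | 0 => count
  | fuel + 1 =>
    if cs = [] then count
    else
      match pvFindK cs cs.length cs.length 1 with
      | some k => pvAltLoop fuel (count + 2) ((cs.drop k).take (cs.length - 2 * k))
      | none => count + 1

def longestDecomposition_alt (S : String) : Int := pvAltLoop (S.toList.length + 1) 0 S.toList

-- ===== PRECONDITION & SPEC =====
def Spec_longestDecomposition (S : String) (out : Int) : Prop := out = longestDecomposition_alt S
instance (S : String) (out : Int) : Decidable (Spec_longestDecomposition S out) := by unfold Spec_longestDecomposition; infer_instance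

-- ===== CLAIM (what is proved, stated in full; the proofs are below) =====
def Claim_equal_longestDecomposition : Prop := ∀ (S : String), Dom_longestDecomposition S → Spec_longestDecomposition S (longestDecomposition S)

-- ===== LEMMAS AND PROOFS =====

-- proof-side non-accumulator form of B's loop
def pvAltRec (fuel : Nat) (cs : List Char) : Int :=
  match fuel with
  | 0 => 0
  | fuel + 1 =>
    if cs.length = 0 then 0
    else
      match pvFindK cs cs.length cs.length 1 with
      | some k => 2 + pvAltRec fuel ((cs.drop k).take (cs.length - 2 * k))
      | none => 1

theorem pvAltLoop_eq (fuel : Nat) : ∀ (count : Int) (cs : List Char),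
    pvAltLoop fuel count cs = count + pvAltRec fuel cs := by
  induction fuel with
  | zero => intro count cs; simp [pvAltLoop, pvAltRec]
  | succ fuel ih =>
      intro count cs
      rw [pvAltLoop, pvAltRec]
      by_cases h : cs = []
      · rw [if_pos h, if_pos (by simp [h])]
        ring
      · rw [if_neg h, if_neg (by simpa using h)]
        cases hk : pvFindK cs cs.length cs.length 1 with
        | some k => simp only []; rw [ih]; ring
        | none => rfl

-- abstract form of A's loop state: (middle segment, accumulated lchar/rchar)
def pvG (fuel : Nat) (mid lchar rchar : List Char) : Int :=
  match fuel with
  | 0 => if lchar ≠ [] then 1 else 0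
  | fuel + 1 =>
    if h : mid = [] then (if lchar ≠ [] then 1 else 0)
    else if lchar ++ [mid.head h] = mid.getLast h :: rchar then
      (if mid.length = 1 then 1 else 2) + pvG fuel mid.tail.dropLast [] []
    else pvG fuel mid.tail.dropLast (lchar ++ [mid.head h]) (mid.getLast h :: rchar)

theorem pvG_nil (fuel : Nat) (lchar rchar : List Char) :
    pvG fuel [] lchar rchar = if lchar ≠ [] then 1 else 0 := by
  cases fuel <;> rfl

-- facts about the middle segment A's pointers delimit
theorem pvMid_ne (cs : List Char) (l r : Int) (hl : 0 ≤ l) (hlr : l ≤ r)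
    (hr : r < (cs.length : Int)) :
    (cs.drop l.toNat).take (r + 1 - l).toNat ≠ [] := by
  apply List.ne_nil_of_length_pos
  simp only [List.length_take, List.length_drop]
  omega

theorem pvMid_head (cs : List Char) (l r : Int) (hl : 0 ≤ l) (hlr : l ≤ r)
    (hr : r < (cs.length : Int)) (h : (cs.drop l.toNat).take (r + 1 - l).toNat ≠ []) :
    ((cs.drop l.toNat).take (r + 1 - l).toNat).head h = PySem.List.pyGetD cs l ' ' := by
  rw [List.head_eq_getElem]
  rw [PySem.List.pyGetD_eq_getElem cs ' ' hl (by omega)]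
  simp only [List.getElem_take, List.getElem_drop]
  simp

theorem pvMid_getLast (cs : List Char) (l r : Int) (hl : 0 ≤ l) (hlr : l ≤ r)
    (hr : r < (cs.length : Int)) (h : (cs.drop l.toNat).take (r + 1 - l).toNat ≠ []) :
    ((cs.drop l.toNat).take (r + 1 - l).toNat).getLast h = PySem.List.pyGetD cs r ' ' := by
  rw [List.getLast_eq_getElem]
  rw [PySem.List.pyGetD_eq_getElem cs ' ' (by omega) (by omega)]
  simp only [List.getElem_take, List.getElem_drop, List.length_take, List.length_drop]
  congr 1
  omega

theorem pvMid_step (cs : List Char) (l r : Int) (hl : 0 ≤ l) (hlr : l ≤ r)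
    (hr : r < (cs.length : Int)) :
    ((cs.drop l.toNat).take (r + 1 - l).toNat).tail.dropLast
      = (cs.drop (l + 1).toNat).take (r - 1 + 1 - (l + 1)).toNat := by
  apply List.ext_getElem
  · simp only [List.length_dropLast, List.length_tail, List.length_take, List.length_drop]
    omega
  · intro i h1 h2
    rw [List.getElem_dropLast, List.getElem_tail, List.getElem_take, List.getElem_drop,
        List.getElem_take, List.getElem_drop]
    congr 1; omega

theorem bridge (cs : List Char) (fuel : Nat) :
    ∀ (l r res : Int) (lchar rchar : List Char),
    0 ≤ l → r < (cs.length : Int) → (r + 1 - l).toNat ≤ 2 * fuel →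
    pvLoopA cs fuel l r res lchar rchar
      = res + pvG fuel ((cs.drop l.toNat).take (r + 1 - l).toNat) lchar rchar := by
  induction fuel with
  | zero =>
      intro l r res lchar rchar hl hr hfuel
      have h0 : (r + 1 - l).toNat = 0 := by omega
      rw [pvLoopA, h0, List.take_zero, pvG]
  | succ fuel ih =>
      intro l r res lchar rchar hl hr hfuel
      by_cases hlr : l ≤ r
      · have hne := pvMid_ne cs l r hl hlr hr
        rw [pvLoopA]
        simp only [if_pos hlr]
        conv_rhs => rw [pvG]
        rw [dif_neg hne, pvMid_head cs l r hl hlr hr hne, pvMid_getLast cs l r hl hlr hr hne]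
        have hlen1 : ((cs.drop l.toNat).take (r + 1 - l).toNat).length = 1 ↔ l = r := by
          simp only [List.length_take, List.length_drop]; omega
        by_cases heq : lchar ++ [PySem.List.pyGetD cs l ' '] = PySem.List.pyGetD cs r ' ' :: rchar
        · rw [if_pos heq, if_pos heq, ih (l + 1) (r - 1) _ [] [] (by omega) (by omega) (by omega),
              pvMid_step cs l r hl hlr hr]
          by_cases hlr' : l = r
          · rw [if_pos (hlen1.mpr hlr'), if_pos hlr']; ring
          · rw [if_neg (fun h => hlr' (hlen1.mp h)), if_neg hlr']; ring
        · rw [if_neg heq, if_neg heq,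
              ih (l + 1) (r - 1) res _ _ (by omega) (by omega) (by omega),
              pvMid_step cs l r hl hlr hr]
      · rw [pvLoopA]
        simp only [if_neg hlr]
        have h0 : (r + 1 - l).toNat = 0 := by omega
        rw [h0, List.take_zero, pvG_nil]

-- pvFindK characterizations
theorem pvFindK_eq_none (cs : List Char) (n : Nat) :
    ∀ fuel k, n / 2 + 1 - k ≤ fuel →
      (∀ i, k ≤ i → i ≤ n / 2 → cs.take i ≠ cs.drop (n - i)) →
      pvFindK cs n fuel k = none := by
  intro fuel
  induction fuel with
  | zero => intro k _ _; rfl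
  | succ fuel ih =>
      intro k hfuel hf
      rw [pvFindK]
      by_cases hk : k ≤ n / 2
      · rw [if_pos hk, if_neg (hf k le_rfl hk)]
        exact ih (k + 1) (by omega) (fun i h1 h2 => hf i (by omega) h2)
      · rw [if_neg hk]

theorem pvFindK_eq_some (cs : List Char) (n j : Nat) :
    ∀ fuel k, n / 2 + 1 - k ≤ fuel → k ≤ j → j ≤ n / 2 → cs.take j = cs.drop (n - j) →
      (∀ i, k ≤ i → i < j → cs.take i ≠ cs.drop (n - i)) →
      pvFindK cs n fuel k = some j := by
  intro fuel
  induction fuel with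
  | zero => intro k hfuel hkj hj _ _; omega
  | succ fuel ih =>
      intro k hfuel hkj hj he hf
      rw [pvFindK, if_pos (by omega)]
      by_cases hkj' : k = j
      · rw [hkj', if_pos he]
      · rw [if_neg (hf k le_rfl (by omega))]
        exact ih (k + 1) (by omega) (by omega) hj he (fun i h1 h2 => hf i (by omega) h2)

theorem pvAltRec_nil (fuel : Nat) : pvAltRec fuel [] = 0 := by
  cases fuel <;> rfl

theorem pvAltRec_of_none (fuel : Nat) (cs : List Char) (hne : cs ≠ [])
    (h : pvFindK cs cs.length cs.length 1 = none) : pvAltRec (fuel + 1) cs = 1 := by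
  rw [pvAltRec, if_neg (by simpa using hne), h]

theorem pvAltRec_of_some (fuel : Nat) (cs : List Char) (k : Nat) (hne : cs ≠ [])
    (h : pvFindK cs cs.length cs.length 1 = some k) :
    pvAltRec (fuel + 1) cs = 2 + pvAltRec fuel ((cs.drop k).take (cs.length - 2 * k)) := by
  rw [pvAltRec, if_neg (by simpa using hne), h]

-- the prefix/suffix of length t+1 of T = lchar ++ mid ++ rchar, mid ≠ []
theorem pvTake_eq (lchar mid rchar : List Char) (h : mid ≠ []) :
    (lchar ++ mid ++ rchar).take (lchar.length + 1) = lchar ++ [mid.head h] := by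
  have hm := List.length_pos_iff.mpr h
  rw [List.append_assoc, List.take_append, List.take_append,
      List.take_of_length_le (by omega)]
  have h1 : lchar.length + 1 - lchar.length = 1 := by omega
  rw [h1, show 1 - mid.length = 0 from by omega, List.take_zero, List.append_nil,
      List.take_one, List.head?_eq_some_head h]
  rfl

theorem pvDrop_eq (lchar mid rchar : List Char) (h : mid ≠ [])
    (hlen : lchar.length = rchar.length) :
    (lchar ++ mid ++ rchar).drop ((lchar ++ mid ++ rchar).length - (lchar.length + 1))
      = mid.getLast h :: rchar := by
  have hm := List.length_pos_iff.mpr h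
  conv_lhs => rw [← List.dropLast_append_getLast h]
  rw [show lchar ++ (mid.dropLast ++ [mid.getLast h]) ++ rchar
        = (lchar ++ mid.dropLast) ++ ([mid.getLast h] ++ rchar) by simp]
  have h1 : ((lchar ++ mid.dropLast) ++ ([mid.getLast h] ++ rchar)).length -
      (lchar.length + 1) = (lchar ++ mid.dropLast).length := by
    simp only [List.length_append, List.length_dropLast, List.length_cons,
      List.length_nil]
    omega
  rw [h1, List.drop_left]
  rfl

-- decomposition of a ≥2-element mid into head, inner part and last
theorem pvMid_decomp (mid : List Char) (h : mid ≠ []) (h2 : mid.length ≠ 1) :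
    mid = mid.head h :: (mid.tail.dropLast ++ [mid.getLast h]) := by
  obtain ⟨a, t, rfl⟩ := List.exists_cons_of_ne_nil h
  have ht : t ≠ [] := by
    intro he; subst he; simp at h2
  simp only [List.head_cons, List.tail_cons]
  rw [List.getLast_cons ht, List.dropLast_append_getLast ht]

-- main lemma: A's abstracted loop equals B's recursion on the full remaining string
theorem pvG_eq_alt (f1 : Nat) : ∀ (f2 : Nat) (mid lchar rchar : List Char),
    mid.length ≤ 2 * f1 → (lchar ++ mid ++ rchar).length < f2 →
    lchar.length = rchar.length →
    (∀ j, 1 ≤ j → j ≤ lchar.length →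
      (lchar ++ mid ++ rchar).take j
        ≠ (lchar ++ mid ++ rchar).drop ((lchar ++ mid ++ rchar).length - j)) →
    pvG f1 mid lchar rchar = pvAltRec f2 (lchar ++ mid ++ rchar) := by
  -- shared argument for the three terminal situations: mid is empty or a single
  -- self-overlapping chunk, every candidate split of what remains fails
  have base : ∀ (f2 : Nat) (mid lchar rchar : List Char),
      (lchar ++ mid ++ rchar).length < f2 → lchar.length = rchar.length →
      mid.length ≤ 1 →
      (∀ i, 1 ≤ i → i ≤ (lchar ++ mid ++ rchar).length / 2 →
        (lchar ++ mid ++ rchar).take i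
          ≠ (lchar ++ mid ++ rchar).drop ((lchar ++ mid ++ rchar).length - i)) →
      (if lchar ≠ [] ∨ mid ≠ [] then (1 : Int) else 0)
        = pvAltRec f2 (lchar ++ mid ++ rchar) := by
    intro f2 mid lchar rchar hf2 hlen hm1 hfail
    by_cases hT : lchar ++ mid ++ rchar = []
    · have h1 : lchar = [] ∧ mid = [] ∧ rchar = [] := by
        simpa [List.append_eq_nil_iff] using hT
      rw [hT, pvAltRec_nil]
      simp [h1.1, h1.2.1]
    · obtain ⟨f2', rfl⟩ : ∃ f2', f2 = f2' + 1 := ⟨f2 - 1, by omega⟩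
      have hnone : pvFindK (lchar ++ mid ++ rchar) (lchar ++ mid ++ rchar).length
          (lchar ++ mid ++ rchar).length 1 = none := by
        apply pvFindK_eq_none _ _ _ _ (by omega) hfail
      rw [pvAltRec_of_none f2' _ hT hnone]
      have hor : lchar ≠ [] ∨ mid ≠ [] := by
        by_contra hc
        push Not at hc
        obtain ⟨hc1, hc2⟩ := hc
        apply hT
        have hrc : rchar = [] := List.eq_nil_of_length_eq_zero (by rw [← hlen, hc1]; rfl)
        simp [hc1, hc2, hrc]
      rw [if_pos hor]
  induction f1 with
  | zero =>
      intro f2 mid lchar rchar hm hf2 hlen hf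
      have hmid : mid = [] := List.eq_nil_of_length_eq_zero (by omega)
      subst hmid
      rw [pvG_nil]
      rw [show (if lchar ≠ [] then (1:Int) else 0)
            = (if lchar ≠ [] ∨ ([] : List Char) ≠ [] then (1:Int) else 0) by simp]
      apply base f2 [] lchar rchar hf2 hlen (by simp)
      intro i h1 h2
      apply hf i h1
      simp only [List.append_nil, List.length_append] at h2 ⊢
      omega
  | succ f1 ih =>
      intro f2 mid lchar rchar hm hf2 hlen hf
      by_cases h : mid = []
      · subst h
        rw [pvG_nil]
        rw [show (if lchar ≠ [] then (1:Int) else 0)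
              = (if lchar ≠ [] ∨ ([] : List Char) ≠ [] then (1:Int) else 0) by simp]
        apply base f2 [] lchar rchar hf2 hlen (by simp)
        intro i h1 h2
        apply hf i h1
        simp only [List.append_nil, List.length_append] at h2 ⊢
        omega
      · have hmp := List.length_pos_iff.mpr h
        have hTlen : (lchar ++ mid ++ rchar).length
            = lchar.length + mid.length + rchar.length := by
          simp only [List.length_append]
        have hTne : lchar ++ mid ++ rchar ≠ [] := by
          intro he
          have hlc := congrArg List.length he
          rw [hTlen] at hlc
          simp only [List.length_nil] at hlc
          omega
        rw [pvG, dif_neg h]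
        by_cases heq : lchar ++ [mid.head h] = mid.getLast h :: rchar
        · rw [if_pos heq]
          have heq' : (lchar ++ mid ++ rchar).take (lchar.length + 1)
              = (lchar ++ mid ++ rchar).drop
                  ((lchar ++ mid ++ rchar).length - (lchar.length + 1)) := by
            rw [pvTake_eq lchar mid rchar h, pvDrop_eq lchar mid rchar h hlen, heq]
          by_cases h1 : mid.length = 1
          · -- middle chunk overlaps itself: A counts 1, B finds no further chunk
            rw [if_pos h1]
            have hmt : mid.tail.dropLast = [] := by
              have : mid.tail.length = 0 := by simp only [List.length_tail]; omega
              rw [List.eq_nil_of_length_eq_zero this]; rfl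
            rw [hmt, pvG_nil, if_neg (by simp)]
            rw [show (1 : Int) + 0 = (if lchar ≠ [] ∨ mid ≠ [] then (1:Int) else 0)
                  by simp [h]]
            apply base f2 mid lchar rchar hf2 hlen (by omega)
            intro i hi1 hi2
            apply hf i hi1
            rw [hTlen] at hi2
            omega
          · rw [if_neg h1]
            obtain ⟨f2', rfl⟩ : ∃ f2', f2 = f2' + 1 := ⟨f2 - 1, by omega⟩
            have hfk : pvFindK (lchar ++ mid ++ rchar) (lchar ++ mid ++ rchar).length
                (lchar ++ mid ++ rchar).length 1 = some (lchar.length + 1) := by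
              apply pvFindK_eq_some
              · omega
              · omega
              · rw [hTlen]; omega
              · exact heq'
              · intro i hi1 hi2; exact hf i hi1 (by omega)
            rw [pvAltRec_of_some f2' _ (lchar.length + 1) hTne hfk]
            have hmidm : (((lchar ++ mid ++ rchar).drop (lchar.length + 1)).take
                  ((lchar ++ mid ++ rchar).length - 2 * (lchar.length + 1)))
                = mid.tail.dropLast := by
              have hd : (lchar ++ mid ++ rchar).drop (lchar.length + 1)
                  = mid.tail.dropLast ++ ([mid.getLast h] ++ rchar) := by
                conv_lhs => rw [pvMid_decomp mid h h1]
                rw [show lchar ++ (mid.head h :: (mid.tail.dropLast ++ [mid.getLast h])) ++ rchar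
                      = (lchar ++ [mid.head h]) ++ (mid.tail.dropLast ++ ([mid.getLast h] ++ rchar))
                    by simp]
                rw [show lchar.length + 1 = (lchar ++ [mid.head h]).length by simp,
                    List.drop_left]
              rw [hd, List.take_append]
              have hl2 : mid.tail.dropLast.length = mid.length - 2 := by
                simp only [List.length_dropLast, List.length_tail]
                omega
              have hl1 : (lchar ++ mid ++ rchar).length - 2 * (lchar.length + 1)
                  = mid.length - 2 := by rw [hTlen]; omega
              rw [hl1, List.take_of_length_le (by omega), hl2,
                  show mid.length - 2 - (mid.length - 2) = 0 from by omega,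
                  List.take_zero, List.append_nil]
            rw [hmidm, ih f2' mid.tail.dropLast [] []
                  (by simp only [List.length_dropLast, List.length_tail]; omega)
                  (by simp only [List.nil_append, List.append_nil]
                      simp only [List.length_dropLast, List.length_tail]
                      rw [hTlen] at hf2; omega)
                  rfl
                  (by intro j hj1 hj2; simp at hj2; omega)]
            simp
        · rw [if_neg heq]
          have hne' : (lchar ++ mid ++ rchar).take (lchar.length + 1)
              ≠ (lchar ++ mid ++ rchar).drop
                  ((lchar ++ mid ++ rchar).length - (lchar.length + 1)) := by
            rw [pvTake_eq lchar mid rchar h, pvDrop_eq lchar mid rchar h hlen]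
            exact heq
          by_cases h1 : mid.length = 1
          · -- the two sides meet without ever matching: both count one final chunk
            have hmt : mid.tail.dropLast = [] := by
              have : mid.tail.length = 0 := by simp only [List.length_tail]; omega
              rw [List.eq_nil_of_length_eq_zero this]; rfl
            rw [hmt, pvG_nil, if_pos (by simp)]
            rw [show (1 : Int) = (if lchar ≠ [] ∨ mid ≠ [] then (1:Int) else 0)
                  by simp [h]]
            apply base f2 mid lchar rchar hf2 hlen (by omega)
            intro i hi1 hi2
            rcases Nat.lt_or_ge i (lchar.length + 1) with hi | hi
            · exact hf i hi1 (by omega)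
            · have hieq : i = lchar.length + 1 := by rw [hTlen] at hi2; omega
              rw [hieq]
              exact hne'
          · have hTeq : (lchar ++ [mid.head h]) ++ mid.tail.dropLast ++ (mid.getLast h :: rchar)
                = lchar ++ mid ++ rchar := by
              conv_rhs => rw [pvMid_decomp mid h h1]
              simp
            rw [ih f2 mid.tail.dropLast (lchar ++ [mid.head h]) (mid.getLast h :: rchar)
                  (by simp only [List.length_dropLast, List.length_tail]; omega)
                  (by rw [hTeq]; exact hf2)
                  (by simp [hlen])
                  ?_]
            · rw [hTeq]
            · intro j hj1 hj2
              rw [hTeq]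
              simp only [List.length_append, List.length_cons, List.length_nil] at hj2
              rcases Nat.lt_or_ge j (lchar.length + 1) with hj | hj
              · exact hf j hj1 (by omega)
              · have hjeq : j = lchar.length + 1 := by omega
                rw [hjeq]
                exact hne'

-- ===== VERDICT (by name: the statement is the Claim_ definition above) =====
theorem longestDecomposition_spec : Claim_equal_longestDecomposition := by
  intro S _
  unfold Spec_longestDecomposition longestDecomposition longestDecomposition_alt
  rw [bridge S.toList S.toList.length 0 ((S.toList.length : Int) - 1) 0 [] []
        le_rfl (by omega) (by omega)]
  have h1 : (((S.toList.length : Int) - 1 + 1 - 0).toNat) = S.toList.length := by omega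
  rw [h1]
  simp only [Int.toNat_zero, List.drop_zero, List.take_length, zero_add]
  rw [pvG_eq_alt S.toList.length (S.toList.length + 1) S.toList [] []
        (by omega) (by simp) rfl (by intro j hj1 hj2; simp at hj2; omega)]
  rw [pvAltLoop_eq]
  simp
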